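-- pv_equiv track=rewrite | github.com/RushikeshPharate/CSCI-551-Elements-of-AI | Assignemtn 2/part1/raichu.py | eval_board
-- ===== SOURCE A (Python) =====
-- def eval_board(board,players):
--
--     w_count=0
--     W_count=0
--     w_raichu_count=0
--     b_count=0
--     B_count=0
--     b_raichu_count=0
--
--     for i in range(len(board)):
--         for j in range(len(board)):
--             if board[i][j]=='w':
--                 w_count+=1
--             elif board[i][j]=='W':
--                 W_count+=1
--             elif board[i][j]=='@':
--                 w_raichu_count+=1
--             elif board[i][j]=='b':
--                 b_count+=1
--             elif board[i][j]=='B':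
--                 B_count+=1
--             elif board[i][j]=='$':
--                 b_raichu_count+=1
--
--     val = 200*(w_raichu_count-b_raichu_count) + 50*(W_count-B_count) + 5*(w_count-b_count)
--     if 'w' in players:
--         return val
--     else:
--         return -val
-- ===== SOURCE B (Python) =====
-- def eval_board(board, players):
--     n = len(board)
--     grid = "".join(row[j] for row in board for j in range(n))
--     val = (5 * (grid.count('w') - grid.count('b'))
--            + 50 * (grid.count('W') - grid.count('B'))
--            + 200 * (grid.count('@') - grid.count('$')))
--     return val if 'w' in players else -val
-- ===== Notes on version B (the rewrite author's own statement) =====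
-- stated objective: alternative
-- what changed: Replaces A's six counters updated by an if/elif chain inside nested index loops (plus a closing difference formula) with a staged computation: flatten the visible n x n grid into one string, then obtain the six symbol counts with the library substring counter and combine them in a single weighted formula.
import Mathlib
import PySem

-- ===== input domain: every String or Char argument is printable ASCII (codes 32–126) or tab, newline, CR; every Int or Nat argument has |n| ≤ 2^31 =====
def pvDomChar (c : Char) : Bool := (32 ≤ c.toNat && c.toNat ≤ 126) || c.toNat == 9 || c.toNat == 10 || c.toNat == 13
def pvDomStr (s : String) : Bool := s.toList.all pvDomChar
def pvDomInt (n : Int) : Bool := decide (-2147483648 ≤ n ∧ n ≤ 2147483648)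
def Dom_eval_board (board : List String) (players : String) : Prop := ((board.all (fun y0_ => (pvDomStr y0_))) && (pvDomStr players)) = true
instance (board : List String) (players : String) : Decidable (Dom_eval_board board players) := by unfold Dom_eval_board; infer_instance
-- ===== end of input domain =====

-- B replaces A's six counters updated by an if/elif chain inside nested index loops by a
-- staged computation: flatten the visible n x n grid into one string, then count each of the
-- six symbols with the library counter and combine them in one weighted formula (same cost).

-- ===== PORT A =====
structure PvCnt where
  w : Int
  W : Int
  at_ : Int
  b : Int
  B : Int
  s : Int
deriving Repr, DecidableEq

-- one cell of A's if/elif chain (board[i][j] comes in as an Option: none = IndexError, excluded by Pre_)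
def pvStepA (st : PvCnt) (c? : Option Char) : PvCnt :=
  match c? with
  | some c =>
    if c = 'w' then { st with w := st.w + 1 }
    else if c = 'W' then { st with W := st.W + 1 }
    else if c = '@' then { st with at_ := st.at_ + 1 }
    else if c = 'b' then { st with b := st.b + 1 }
    else if c = 'B' then { st with B := st.B + 1 }
    else if c = '$' then { st with s := st.s + 1 }
    else st
  | none => st

def eval_board (board : List String) (players : String) : Int :=
  let n : Int := (board.length : Int)
  let st := (PySem.List.pyRange 0 n 1).foldl (fun st i =>
    (PySem.List.pyRange 0 n 1).foldl (fun st j =>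
      pvStepA st ((PySem.List.pyGet? board i).bind (fun row => PySem.Str.pyGet? row j))) st)
    ⟨0, 0, 0, 0, 0, 0⟩
  let val := 200 * (st.at_ - st.s) + 50 * (st.W - st.B) + 5 * (st.w - st.b)
  if PySem.Str.isIn "w" players then val else -val

-- ===== PORT B =====
def eval_board_alt (board : List String) (players : String) : Int :=
  let n : Int := (board.length : Int)
  -- grid = "".join(row[j] for row in board for j in range(n));
  -- row[j] is none exactly where Python raises IndexError (excluded by Pre_)
  let grid : List (Option Char) :=
    board.flatMap (fun row => (PySem.List.pyRange 0 n 1).map (fun j => PySem.Str.pyGet? row j))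
  let val : Int :=
    5 * ((grid.count (some 'w') : Int) - (grid.count (some 'b') : Int))
      + 50 * ((grid.count (some 'W') : Int) - (grid.count (some 'B') : Int))
      + 200 * ((grid.count (some '@') : Int) - (grid.count (some '$') : Int))
  if PySem.Str.isIn "w" players then val else -val

-- ===== PRECONDITION & SPEC =====
-- exactly A's domain: A indexes board[i][j] for all i,j < len(board), so it raises IndexError
-- iff some row is shorter than the number of rows
def Pre_eval_board (board : List String) (players : String) : Prop :=
  ∀ row ∈ board, board.length ≤ row.length

instance (board : List String) (players : String) : Decidable (Pre_eval_board board players) := by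
  unfold Pre_eval_board; infer_instance

def pvWitness_eval_board : List String × String := (["w$", ".B"], "w")

def Spec_eval_board (board : List String) (players : String) (out : Int) : Prop :=
  out = eval_board_alt board players

instance (board : List String) (players : String) (out : Int) : Decidable (Spec_eval_board board players out) := by
  unfold Spec_eval_board; infer_instance

-- ===== CLAIM (what is proved, stated in full; the proofs are below) =====
def Claim_equal_eval_board : Prop := ∀ (board : List String) (players : String), Dom_eval_board board players → Pre_eval_board board players → Spec_eval_board board players (eval_board board players)

-- ===== LEMMAS AND PROOFS =====

-- the signed weight of one cell (proof-side abstraction shared by both directions)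
def pvWt (c : Char) : Int :=
  if c = 'w' then 5 else if c = 'W' then 50 else if c = '@' then 200
  else if c = 'b' then -5 else if c = 'B' then -50 else if c = '$' then -200 else 0

def pvOptWt (c? : Option Char) : Int := (c?.map pvWt).getD 0

-- the linear functional A's closing formula computes from its six counters
def pvL (st : PvCnt) : Int := 200 * (st.at_ - st.s) + 50 * (st.W - st.B) + 5 * (st.w - st.b)

theorem pvL_stepA (st : PvCnt) (c? : Option Char) : pvL (pvStepA st c?) = pvL st + pvOptWt c? := by
  rcases c? with _ | c
  · simp [pvStepA, pvOptWt]
  · simp only [pvStepA, pvOptWt, pvWt, Option.map_some, Option.getD_some]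
    split_ifs <;> simp [pvL] <;> ring

theorem pvL_foldl1 (f : Int → Option Char) (l : List Int) (st : PvCnt) :
    pvL (l.foldl (fun st j => pvStepA st (f j)) st)
      = pvL st + (l.map (fun j => pvOptWt (f j))).sum := by
  induction l generalizing st with
  | nil => simp
  | cons y ys ih => rw [List.foldl_cons, ih, pvL_stepA]; simp; ring

theorem pvL_foldl2 (g : Int → Int → Option Char) (R S : List Int) (st : PvCnt) :
    pvL (R.foldl (fun st i => S.foldl (fun st j => pvStepA st (g i j)) st) st)
      = pvL st + (R.map (fun i => (S.map (fun j => pvOptWt (g i j))).sum)).sum := by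
  induction R generalizing st with
  | nil => simp
  | cons x xs ih => rw [List.foldl_cons, ih, pvL_foldl1]; simp; ring

theorem pvMap_range_getElem? {α β : Type} (l : List α) (h : Option α → β) :
    (List.range l.length).map (fun i => h l[i]?) = l.map (fun x => h (some x)) := by
  apply List.ext_getElem
  · simp
  · intro i h1 h2
    have hi : i < l.length := by simpa using h2
    simp [List.getElem?_eq_getElem hi]

-- B's six-count weighted formula is the sum of signed weights over the grid's cells
theorem pvOptCounts_eq_sum (l : List (Option Char)) :
    5 * ((l.count (some 'w') : Int) - (l.count (some 'b') : Int))
      + 50 * ((l.count (some 'W') : Int) - (l.count (some 'B') : Int))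
      + 200 * ((l.count (some '@') : Int) - (l.count (some '$') : Int))
      = (l.map pvOptWt).sum := by
  induction l with
  | nil => simp
  | cons x t ih =>
    simp only [List.count_cons, List.map_cons, List.sum_cons]
    rw [← ih]
    rcases x with _ | c
    · simp [pvOptWt]
    · by_cases h1 : c = 'w' <;> by_cases h2 : c = 'W' <;> by_cases h3 : c = '@' <;>
        by_cases h4 : c = 'b' <;> by_cases h5 : c = 'B' <;> by_cases h6 : c = '$' <;>
        simp_all [pvOptWt, pvWt] <;> linarith

-- ===== VERDICT (by name: the statement is the Claim_ definition above) =====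
theorem eval_board_spec : Claim_equal_eval_board := by
  intro board players _ _
  unfold Spec_eval_board eval_board eval_board_alt
  simp only
  have hfold : ∀ st : PvCnt,
      200 * (st.at_ - st.s) + 50 * (st.W - st.B) + 5 * (st.w - st.b) = pvL st := fun _ => rfl
  rw [hfold, pvL_foldl2]
  have h0 : pvL ⟨0, 0, 0, 0, 0, 0⟩ = 0 := rfl
  rw [h0, zero_add, pvOptCounts_eq_sum, List.flatMap_def, List.map_flatten,
    List.sum_flatten, List.map_map, List.map_map]
  have hR : PySem.List.pyRange 0 (board.length : Int) 1
      = (List.range board.length).map (fun k : Nat => (k : Int)) :=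
    PySem.List.pyRange_zero_natCast board.length
  rw [hR, List.map_map]
  simp only [Function.comp_def, PySem.List.pyGet?_natCast, List.map_map]
  rw [pvMap_range_getElem? board (fun r? => ((List.range board.length).map
    (fun j : Nat => pvOptWt (r?.bind fun a => PySem.Str.pyGet? a (j : Int)))).sum)]
  simp only [Option.bind_some]
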